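-- pv_equiv track=rewrite | github.com/seigot/atcoder | abc275/d/main.py | funcf
-- ===== SOURCE A (Python) =====
-- from collections import defaultdict, deque
--
-- MEMO = defaultdict(int)
--
-- def funcf(k):
--
--     if k == 0:
--         return 1
--
--     val1 = k//2
--     val2 = k//3
--
--     # ans1
--     if val1 == 0:
--         ans1 = 1
--     elif MEMO[val1] != 0:
--         ans1 = MEMO[val1]
--     else:
--         ans1 = funcf(val1)
--         MEMO[val1] = ans1
--
--     # ans2
--     if val2 == 0:
--         ans2 = 1
--     elif MEMO[val2] != 0:
--         ans2 = MEMO[val2]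
--     else:
--         ans2 = funcf(val2)
--         MEMO[val2] = ans2
--
--     return ans1 + ans2
-- ===== SOURCE B (Python) =====
-- def funcf(k):
--     if k == 0:
--         return 1
--     return funcf(k // 2) + funcf(k // 3)
-- ===== Notes on version B (the rewrite author's own statement) =====
-- stated objective: simpler
-- what changed: Replaced the global-defaultdict memoized recursion with the plain three-line recurrence f(k)=f(k//2)+f(k//3) with the zero base case; no cache, no mutable global state.
import Mathlib
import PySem

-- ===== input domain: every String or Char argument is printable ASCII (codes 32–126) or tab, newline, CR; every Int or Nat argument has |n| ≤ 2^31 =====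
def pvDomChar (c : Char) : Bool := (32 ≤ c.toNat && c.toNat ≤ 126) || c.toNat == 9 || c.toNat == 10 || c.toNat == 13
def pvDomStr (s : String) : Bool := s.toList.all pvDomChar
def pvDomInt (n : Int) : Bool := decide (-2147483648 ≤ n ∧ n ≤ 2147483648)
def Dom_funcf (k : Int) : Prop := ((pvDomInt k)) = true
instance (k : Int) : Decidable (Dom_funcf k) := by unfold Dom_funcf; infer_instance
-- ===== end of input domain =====

-- B replaces the global-defaultdict memoized recursion by the plain unmemoized
-- recurrence on k//2 and k//3 with its zero base case (objective: simpler).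

-- ===== PORT A =====
-- A recurses through a global MEMO dict; the port threads that dict as explicit state.
-- 'MEMO[v] != 0' on the defaultdict is ported as 'getD v 0 ≠ 0' (the defaultdict also
-- inserts a 0 on a missing read, which no later lookup with default 0 can observe).
-- Fuel k.toNat + 1 suffices: each recursive call is on k//2 or k//3 with 1 ≤ k.
def funcfA : Nat → Int → PySem.Dict Int Int → Int × PySem.Dict Int Int
  | 0, _, m => (0, m)
  | fuel + 1, k, m =>
    if k = 0 then (1, m) else
    let val1 := PySem.Int.floordiv k 2
    let val2 := PySem.Int.floordiv k 3
    let r1 : Int × PySem.Dict Int Int :=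
      if val1 = 0 then (1, m)
      else if m.getD val1 0 ≠ 0 then (m.getD val1 0, m)
      else
        let p := funcfA fuel val1 m
        (p.1, p.2.insert val1 p.1)
    let r2 : Int × PySem.Dict Int Int :=
      if val2 = 0 then (1, r1.2)
      else if r1.2.getD val2 0 ≠ 0 then (r1.2.getD val2 0, r1.2)
      else
        let p := funcfA fuel val2 r1.2
        (p.1, p.2.insert val2 p.1)
    (r1.1 + r2.1, r2.2)

def funcf (k : Int) : Int := (funcfA (k.toNat + 1) k PySem.Dict.empty).1

-- ===== PORT B =====
-- same fuel convention (recursion depth on k//2, k//3 is bounded by k.toNat)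
def funcfB : Nat → Int → Int
  | 0, _ => 0
  | fuel + 1, k =>
    if k = 0 then 1
    else funcfB fuel (PySem.Int.floordiv k 2) + funcfB fuel (PySem.Int.floordiv k 3)

def funcf_alt (k : Int) : Int := funcfB (k.toNat + 1) k

-- ===== PRECONDITION & SPEC =====
-- Pre_ excludes k < 0, on which the Python A recurses forever (RecursionError).
def Pre_funcf (k : Int) : Prop := 0 ≤ k
instance (k : Int) : Decidable (Pre_funcf k) := by unfold Pre_funcf; infer_instance
def pvWitness_funcf : Int := 12

def Spec_funcf (k : Int) (out : Int) : Prop := out = funcf_alt k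
instance (k : Int) (out : Int) : Decidable (Spec_funcf k out) := by unfold Spec_funcf; infer_instance

-- ===== CLAIM (what is proved, stated in full; the proofs are below) =====
def Claim_equal_funcf : Prop := ∀ (k : Int), Dom_funcf k → Pre_funcf k → Spec_funcf k (funcf k)

-- ===== LEMMAS AND PROOFS =====

theorem fd_nonneg {k : Int} (h : 0 ≤ k) (b : Int) (hb : 0 < b) :
    0 ≤ PySem.Int.floordiv k b := by
  rw [PySem.Int.floordiv_eq_ediv_of_pos hb]
  exact Int.ediv_nonneg h (le_of_lt hb)

theorem fd_toNat_lt {k : Int} (h : 1 ≤ k) {b : Int} (hb : 2 ≤ b) :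
    (PySem.Int.floordiv k b).toNat < k.toNat := by
  rw [PySem.Int.floordiv_eq_ediv_of_pos (by omega)]
  have h2 : 0 ≤ k / b := Int.ediv_nonneg (by omega) (by omega)
  have h1 : k / b < k := by
    rw [Int.ediv_lt_iff_lt_mul (by omega)]
    nlinarith
  omega

-- fuel irrelevance for B's port
theorem funcfB_fuel : ∀ (f₁ f₂ : Nat) (k : Int), 0 ≤ k → k.toNat < f₁ → k.toNat < f₂ →
    funcfB f₁ k = funcfB f₂ k := by
  intro f₁
  induction f₁ with
  | zero => intro f₂ k _ h1 _; omega
  | succ f ih =>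
    intro f₂ k hk h1 h2
    match f₂ with
    | 0 => omega
    | f₂' + 1 =>
      simp only [funcfB]
      by_cases hk0 : k = 0
      · simp [hk0]
      · have h1' : 1 ≤ k := by omega
        have l2 := fd_toNat_lt h1' (b := 2) (by omega)
        have l3 := fd_toNat_lt h1' (b := 3) (by omega)
        rw [if_neg hk0, if_neg hk0,
            ih f₂' _ (fd_nonneg hk 2 (by omega)) (by omega) (by omega),
            ih f₂' _ (fd_nonneg hk 3 (by omega)) (by omega) (by omega)]

theorem funcfB_eval {f : Nat} {k : Int} (hk : 0 ≤ k) (hf : k.toNat < f) :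
    funcfB f k = funcf_alt k := by
  unfold funcf_alt
  exact funcfB_fuel f (k.toNat + 1) k hk hf (by omega)

-- one unfolding step of B at canonical fuel
theorem funcf_alt_rec {k : Int} (hk : 1 ≤ k) :
    funcf_alt k = funcf_alt (PySem.Int.floordiv k 2) + funcf_alt (PySem.Int.floordiv k 3) := by
  have l2 := fd_toNat_lt hk (b := 2) (by omega)
  have l3 := fd_toNat_lt hk (b := 3) (by omega)
  rw [show funcf_alt k = funcfB (k.toNat + 1) k from rfl,
      show funcfB (k.toNat + 1) k
         = if k = 0 then 1
           else funcfB k.toNat (PySem.Int.floordiv k 2) + funcfB k.toNat (PySem.Int.floordiv k 3)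
        from rfl,
      if_neg (by omega : ¬ k = 0),
      funcfB_eval (fd_nonneg (by omega) 2 (by omega)) (by omega),
      funcfB_eval (fd_nonneg (by omega) 3 (by omega)) (by omega)]

-- memo invariant: every nonzero stored value at a nonnegative key is the true answer
def MemoOK (m : PySem.Dict Int Int) : Prop :=
  ∀ j : Int, 0 ≤ j → m.getD j 0 ≠ 0 → m.getD j 0 = funcf_alt j

theorem memoOK_insert_val {m : PySem.Dict Int Int} (hm : MemoOK m) {v a : Int}
    (hv : 0 ≤ v) (ha : a = funcf_alt v) : MemoOK (m.insert v a) := by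
  intro j hj hne
  by_cases hjv : j = v
  · subst hjv
    rw [PySem.Dict.getD_insert_self]
    exact ha
  · rw [PySem.Dict.getD_insert, if_neg hjv] at hne ⊢
    exact hm j hj hne

-- main lemma: with enough fuel and a sound memo, A's helper returns B's value
-- and keeps the memo sound
theorem funcfA_correct : ∀ (f : Nat) (k : Int) (m : PySem.Dict Int Int),
    0 ≤ k → k.toNat < f → MemoOK m →
    (funcfA f k m).1 = funcf_alt k ∧ MemoOK (funcfA f k m).2 := by
  intro f
  induction f with
  | zero => intro k _ _ h _; omega
  | succ f ih =>
    intro k m hk hf hm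
    by_cases hk0 : k = 0
    · subst hk0
      exact ⟨by simp [funcfA, funcf_alt, funcfB], by simpa [funcfA] using hm⟩
    · have h1 : 1 ≤ k := by omega
      simp only [funcfA, if_neg hk0]
      have hv1n : 0 ≤ PySem.Int.floordiv k 2 := fd_nonneg hk 2 (by omega)
      have hv2n : 0 ≤ PySem.Int.floordiv k 3 := fd_nonneg hk 3 (by omega)
      have hl1 : (PySem.Int.floordiv k 2).toNat < f := by
        have := fd_toNat_lt h1 (b := 2) (by omega); omega
      have hl2 : (PySem.Int.floordiv k 3).toNat < f := by
        have := fd_toNat_lt h1 (b := 3) (by omega); omega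
      have step1 : ∀ (v : Int), 0 ≤ v → v.toNat < f → ∀ (m' : PySem.Dict Int Int), MemoOK m' →
          (if v = 0 then ((1 : Int), m')
           else if m'.getD v 0 ≠ 0 then (m'.getD v 0, m')
           else let p := funcfA f v m'; (p.1, p.2.insert v p.1)).1 = funcf_alt v ∧
          MemoOK (if v = 0 then ((1 : Int), m')
           else if m'.getD v 0 ≠ 0 then (m'.getD v 0, m')
           else let p := funcfA f v m'; (p.1, p.2.insert v p.1)).2 := by
        intro v hv hvf m' hm'
        split_ifs with hz hnz
        · subst hz; exact ⟨by simp [funcf_alt, funcfB], hm'⟩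
        · exact ⟨hm' v hv hnz, hm'⟩
        · obtain ⟨he, hmo⟩ := ih v m' hv hvf hm'
          exact ⟨he, memoOK_insert_val hmo hv he⟩
      obtain ⟨e1, mo1⟩ := step1 _ hv1n hl1 m hm
      obtain ⟨e2, mo2⟩ := step1 _ hv2n hl2 _ mo1
      refine ⟨?_, mo2⟩
      simp only at e1 e2 ⊢
      rw [e1, e2, funcf_alt_rec h1]

-- ===== VERDICT (by name: the statement is the Claim_ definition above) =====
theorem funcf_spec : Claim_equal_funcf := by
  intro k _ hpre
  unfold Spec_funcf funcf
  exact (funcfA_correct (k.toNat + 1) k PySem.Dict.empty hpre (by omega)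
    (by intro j _ h; simp [PySem.Dict.getD_empty] at h)).1
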